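-- pv_equiv track=rewrite | github.com/edge555/Online-Judge-Solves | Codechef/Lapindromes.py | lapin
-- ===== SOURCE A (Python) =====
-- def lapin(a):
--     b=""
--     c=""
--     i=0
--     j=len(a)-1
--     while i<j:
--         b+=a[i]
--         c+=a[j]
--         i+=1
--         j-=1
--     return sorted(b)==sorted(c)
-- ===== SOURCE B (Python) =====
-- def lapin(a):
--     n = len(a)
--     half = n // 2
--     delta = {}
--     for i in range(half):
--         x = a[i]
--         delta[x] = delta.get(x, 0) + 1
--         y = a[n - 1 - i]
--         delta[y] = delta.get(y, 0) - 1
--     return not any(delta.values())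
-- ===== Notes on version B (the rewrite author's own statement) =====
-- stated objective: faster
-- what changed: Replaces A's build-two-strings-then-sort-and-compare with a single pass over the first half that keeps one dict of net character counts (+1 for the left half, -1 for the mirrored right half) and checks that all balances are zero.
import Mathlib
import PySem

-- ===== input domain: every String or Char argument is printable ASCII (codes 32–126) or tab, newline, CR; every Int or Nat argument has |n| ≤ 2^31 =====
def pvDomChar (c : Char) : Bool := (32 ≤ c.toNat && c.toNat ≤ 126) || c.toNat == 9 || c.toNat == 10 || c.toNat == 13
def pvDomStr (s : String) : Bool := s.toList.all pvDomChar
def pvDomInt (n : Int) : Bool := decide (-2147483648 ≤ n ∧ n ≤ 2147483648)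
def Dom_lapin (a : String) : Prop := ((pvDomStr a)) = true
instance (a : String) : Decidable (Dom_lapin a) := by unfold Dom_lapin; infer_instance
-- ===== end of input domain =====

-- B replaces A's build-two-half-strings-then-sort-and-compare with a single pass over the
-- first half keeping one dict of net per-character balances (objective: faster).

-- ===== PORT A =====
-- while i<j: b+=a[i]; c+=a[j]; i+=1; j-=1  — whenever the body runs, 0 ≤ i < j ≤ len(a)-1,
-- so both indexings are in range and pyGetD with a default is exact (Python never raises here)
def lapinLoop (l b c : List Char) (i j : Int) : List Char × List Char :=
  if i < j then
    lapinLoop l (b ++ [PySem.List.pyGetD l i ' ']) (c ++ [PySem.List.pyGetD l j ' ']) (i + 1) (j - 1)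
  else (b, c)
termination_by (j - i).toNat
decreasing_by omega

def lapin (a : String) : Bool :=
  let l := a.toList
  let bc := lapinLoop l [] [] 0 ((l.length : Int) - 1)
  PySem.List.sorted bc.1 (fun x => x) false == PySem.List.sorted bc.2 (fun x => x) false

-- ===== PORT B =====
-- the dict of net balances: for i in range(n//2): delta[a[i]] += 1; delta[a[n-1-i]] -= 1
-- (both indices lie in [0, len) for every i in range(n//2), so pyGetD with a default is exact)
def lapinDelta (l : List Char) : PySem.Dict Char Int :=
  (PySem.List.pyRange 0 (PySem.Int.floordiv (l.length : Int) 2) 1).foldl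
    (fun d i =>
      (d.modify (PySem.List.pyGetD l i ' ') 0 (· + 1)).modify
        (PySem.List.pyGetD l ((l.length : Int) - 1 - i) ' ') 0 (· - 1)) PySem.Dict.empty

-- not any(delta.values())
def lapin_alt (a : String) : Bool :=
  !((PySem.Dict.values (lapinDelta a.toList)).any (fun v => !(v == 0)))

-- ===== PRECONDITION & SPEC =====
def Spec_lapin (a : String) (out : Bool) : Prop := out = lapin_alt a
instance (a : String) (out : Bool) : Decidable (Spec_lapin a out) := by unfold Spec_lapin; infer_instance

-- ===== CLAIM (what is proved, stated in full; the proofs are below) =====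
def Claim_equal_lapin : Prop := ∀ (a : String), Dom_lapin a → Spec_lapin a (lapin a)

-- ===== LEMMAS AND PROOFS =====

-- A's loop, run on the segment [i, i+d) of l, appends the left half of the segment to b
-- and the reversed right half to c
theorem lapin_loop_spec (d : Nat) : ∀ (l b c : List Char) (i : Nat), i + d ≤ l.length →
    lapinLoop l b c (i : Int) ((i : Int) + (d : Int) - 1) =
      (b ++ (l.drop i).take (d / 2), c ++ ((l.drop (i + d - d / 2)).take (d / 2)).reverse) := by
  induction d using Nat.twoStepInduction with
  | zero => intro l b c i h; rw [lapinLoop]; simp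
  | one => intro l b c i h; rw [lapinLoop]; simp
  | more d ih _ =>
    intro l b c i h
    rw [lapinLoop]
    have hlt : (i : Int) < (i : Int) + ((d : Nat) + 2 : Nat) - 1 := by push_cast; omega
    rw [if_pos hlt]
    have hi : i < l.length := by omega
    have hj : i + d + 1 < l.length := by omega
    have e1 : (i : Int) + 1 = ((i + 1 : Nat) : Int) := by push_cast; ring
    have e2 : (i : Int) + ((d : Nat) + 2 : Nat) - 1 - 1 = ((i + 1 : Nat) : Int) + (d : Int) - 1 := by
      push_cast; ring
    rw [e2]
    have hx : PySem.List.pyGetD l (i : Int) ' ' = l[i] := by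
      rw [PySem.List.pyGetD_natCast]; exact List.getD_eq_getElem l ' ' hi
    have hjval : (i : Int) + ((d : Nat) + 2 : Nat) - 1 = ((i + d + 1 : Nat) : Int) := by
      push_cast; ring
    have hy : PySem.List.pyGetD l ((i : Int) + ((d : Nat) + 2 : Nat) - 1) ' ' = l[i + d + 1] := by
      rw [hjval, PySem.List.pyGetD_natCast]; exact List.getD_eq_getElem l ' ' hj
    rw [hx, hy, e1, ih l (b ++ [l[i]]) (c ++ [l[i + d + 1]]) (i + 1) (by omega)]
    have h2 : (d + 2) / 2 = d / 2 + 1 := by omega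
    rw [Prod.mk.injEq]
    refine ⟨?_, ?_⟩
    · rw [h2, List.drop_eq_getElem_cons hi, List.take_succ_cons]
      simp
    · rw [h2]
      have hm : i + (d + 2) - (d / 2 + 1) = (i + 1) + d - d / 2 := by omega
      rw [hm]
      have hlen : (i + 1) + d - d / 2 + d / 2 = i + d + 1 := by omega
      have : (List.drop ((i + 1) + d - d / 2) l).take (d / 2 + 1)
           = (List.drop ((i + 1) + d - d / 2) l).take (d / 2) ++ [l[i + d + 1]] := by
        rw [List.take_add_one]
        congr 1
        have hlt2 : d / 2 < (List.drop ((i + 1) + d - d / 2) l).length := by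
          simp; omega
        rw [List.getElem?_eq_getElem hlt2]
        simp [List.getElem_drop, hlen]
      rw [this]
      simp

-- A returns true exactly when the two halves are permutations of each other
theorem lapin_char (a : String) :
    (lapin a = true) ↔
      ((a.toList.take (a.toList.length / 2)).Perm
        (a.toList.reverse.take (a.toList.length / 2))) := by
  unfold lapin
  set l := a.toList with hl
  have hloop := lapin_loop_spec l.length l [] [] 0 (by omega)
  simp only [Nat.cast_zero, zero_add, List.drop_zero, List.nil_append] at hloop
  simp only [hloop]
  have hc : (l.drop (l.length - l.length / 2)).take (l.length / 2) = l.drop (l.length - l.length / 2) := by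
    apply List.take_of_length_le
    simp; omega
  rw [hc, ← List.take_reverse]
  simp only [beq_iff_eq]
  exact PySem.List.sorted_id_eq_sorted_id_iff_perm _ _

-- B's loop body as a function of the two characters it touches
def lapinStep (d : PySem.Dict Char Int) (x y : Char) : PySem.Dict Char Int :=
  (d.modify x 0 (· + 1)).modify y 0 (· - 1)

theorem lapin_fold_getD (ps : List (Char × Char)) : ∀ (d : PySem.Dict Char Int) (k : Char),
    (ps.foldl (fun d p => lapinStep d p.1 p.2) d).getD k 0
      = d.getD k 0 + ((ps.map Prod.fst).count k : Int) - ((ps.map Prod.snd).count k : Int) := by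
  induction ps with
  | nil => intro d k; simp
  | cons p t ih =>
    intro d k
    rw [List.foldl_cons, ih]
    simp only [lapinStep, PySem.Dict.getD_modify, List.map_cons, List.count_cons]
    simp only [beq_iff_eq]
    split_ifs <;>
      first
      | (subst_vars; push_cast; omega)
      | (subst_vars; simp_all; omega)
      | (subst_vars; simp_all)

theorem lapin_fold_mem_keys (ps : List (Char × Char)) : ∀ (d : PySem.Dict Char Int) (k : Char),
    k ∈ (ps.foldl (fun d p => lapinStep d p.1 p.2) d).keys
      ↔ k ∈ d.keys ∨ k ∈ ps.map Prod.fst ∨ k ∈ ps.map Prod.snd := by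
  induction ps with
  | nil => intro d k; simp
  | cons p t ih =>
    intro d k
    rw [List.foldl_cons, ih]
    simp only [lapinStep, PySem.Dict.keys_modify, PySem.Dict.mem_keys_insert, List.map_cons,
      List.mem_cons]
    tauto

theorem lapin_fold_nodup_keys (ps : List (Char × Char)) : ∀ (d : PySem.Dict Char Int),
    d.keys.Nodup → (ps.foldl (fun d p => lapinStep d p.1 p.2) d).keys.Nodup := by
  induction ps with
  | nil => intro d h; simpa using h
  | cons p t ih =>
    intro d h
    rw [List.foldl_cons]
    refine ih _ ?_
    simp only [lapinStep, PySem.Dict.keys_modify]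
    exact PySem.Dict.nodup_keys_insert _ _ _
      (by rw [PySem.Dict.keys_modify]; exact PySem.Dict.nodup_keys_insert _ _ _ h)

-- a fold over indices 0..h-1 reading P[k] and Q[k] is a fold over the zipped h-prefixes
theorem lapin_zip_fold (g : PySem.Dict Char Int → Char → Char → PySem.Dict Char Int) :
    ∀ (h : Nat) (P Q : List Char) (d : PySem.Dict Char Int), h ≤ P.length → h ≤ Q.length →
    (List.range h).foldl (fun d k => g d (P.getD k ' ') (Q.getD k ' ')) d
      = ((P.take h).zip (Q.take h)).foldl (fun d p => g d p.1 p.2) d := by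
  intro h
  induction h with
  | zero => intro P Q d _ _; simp
  | succ h ih =>
    intro P Q d hP hQ
    rw [List.range_succ, List.foldl_append, ih P Q d (by omega) (by omega)]
    have hP' : h < P.length := by omega
    have hQ' : h < Q.length := by omega
    rw [List.take_add_one, List.take_add_one,
        List.getElem?_eq_getElem hP', List.getElem?_eq_getElem hQ',
        List.zip_append (by simp; omega), List.foldl_append]
    simp [List.getElem?_eq_getElem hP', List.getElem?_eq_getElem hQ']

-- B returns true exactly when every character occurs equally often in the two halves
theorem lapin_alt_char (a : String) :
    (lapin_alt a = true) ↔
      (∀ k : Char, (a.toList.take (a.toList.length / 2)).count k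
        = (a.toList.reverse.take (a.toList.length / 2)).count k) := by
  unfold lapin_alt
  set l := a.toList with hl
  set h : Nat := l.length / 2 with hh
  have hhalf : PySem.Int.floordiv (l.length : Int) 2 = ((h : Nat) : Int) := by
    rw [hh]; exact_mod_cast PySem.Int.floordiv_natCast l.length 2
  have hrange : PySem.List.pyRange 0 ((h : Nat) : Int) 1
      = (List.range h).map (fun k => (0 : Int) + (k : Nat)) := by
    rw [PySem.List.pyRange_one]; norm_num
  have hbody : ∀ (d : PySem.Dict Char Int), ∀ k ∈ List.range h,
      (fun (d : PySem.Dict Char Int) (i : Int) =>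
        (d.modify (PySem.List.pyGetD l i ' ') 0 (· + 1)).modify
          (PySem.List.pyGetD l ((l.length : Int) - 1 - i) ' ') 0 (· - 1)) d ((0 : Int) + (k : Nat))
      = lapinStep d (l.getD k ' ') (l.reverse.getD k ' ') := by
    intro d k hk
    simp only [List.mem_range] at hk
    have hkl : k < l.length := by omega
    have e1 : (0 : Int) + (k : Nat) = ((k : Nat) : Int) := by ring
    have e2 : (l.length : Int) - 1 - ((k : Nat) : Int) = ((l.length - 1 - k : Nat) : Int) := by
      omega
    beta_reduce
    rw [e1, e2, PySem.List.pyGetD_natCast, PySem.List.pyGetD_natCast, lapinStep]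
    congr 1
    rw [List.getD_eq_getElem l ' ' (by omega),
        List.getD_eq_getElem l.reverse ' ' (by simpa using hkl)]
    rw [List.getElem_reverse]
  have hXlen : (l.take h).length = h := by simp [hh]; omega
  have hYlen : (l.reverse.take h).length = h := by simp [hh]; omega
  have hfold : lapinDelta l
      = ((l.take h).zip (l.reverse.take h)).foldl (fun d p => lapinStep d p.1 p.2)
          PySem.Dict.empty := by
    unfold lapinDelta
    rw [hhalf, hrange, List.foldl_map]
    rw [PySem.List.foldl_congr_mem _ _
      (fun d k => lapinStep d (l.getD k ' ') (l.reverse.getD k ' ')) _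
      (by intro acc x hx; have := hbody acc x hx; simpa using this)]
    exact lapin_zip_fold lapinStep h l l.reverse PySem.Dict.empty (by rw [hh]; omega)
      (by rw [List.length_reverse, hh]; omega)
  rw [hfold]
  have hnd := lapin_fold_nodup_keys ((l.take h).zip (l.reverse.take h)) PySem.Dict.empty
    PySem.Dict.nodup_keys_empty
  rw [PySem.Dict.values_eq_map_keys _ hnd 0]
  have hfst : ((l.take h).zip (l.reverse.take h)).map Prod.fst = l.take h :=
    List.map_fst_zip (by omega)
  have hsnd : ((l.take h).zip (l.reverse.take h)).map Prod.snd = l.reverse.take h :=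
    List.map_snd_zip (by omega)
  simp only [Bool.not_eq_true', List.any_eq_false, List.mem_map,
    Bool.not_eq_false, beq_iff_eq, forall_exists_index, and_imp,
    forall_apply_eq_imp_iff₂]
  constructor
  · intro hz c
    by_cases hc : c ∈ (((l.take h).zip (l.reverse.take h)).foldl
        (fun d p => lapinStep d p.1 p.2) PySem.Dict.empty).keys
    · have hg := lapin_fold_getD ((l.take h).zip (l.reverse.take h)) PySem.Dict.empty c
      rw [hfst, hsnd] at hg
      have := hz c hc
      rw [hg] at this
      simp only [PySem.Dict.getD_empty] at this
      omega
    · rw [lapin_fold_mem_keys, hfst, hsnd] at hc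
      push Not at hc
      rw [List.count_eq_zero.mpr hc.2.1, List.count_eq_zero.mpr hc.2.2]
  · intro hc k _
    have hg := lapin_fold_getD ((l.take h).zip (l.reverse.take h)) PySem.Dict.empty k
    rw [hfst, hsnd] at hg
    rw [hg]
    simp only [PySem.Dict.getD_empty]
    have := hc k
    omega

-- ===== VERDICT (by name: the statement is the Claim_ definition above) =====
theorem lapin_spec : Claim_equal_lapin := by
  intro a _
  unfold Spec_lapin
  rw [Bool.eq_iff_iff, lapin_char, lapin_alt_char, List.perm_iff_count]
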